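-- pv_equiv track=rewrite | github.com/Krishnan1714/Specialized-language-models-RNN-for-log-analysis-in-Edge-Devides | src/t5sum.py | find_longest_length
-- ===== SOURCE A (Python) =====
-- def find_longest_length(dataset):
--     """
--     Find the longest Logs and Summary in the entire training set.
--     """
--     max_length = 0
--     counter_4k = 0
--     counter_2k = 0
--     counter_1k = 0
--     counter_500 = 0
--     for text in dataset:
--         corpus = text.split()
--         if len(corpus) > max_length:
--             max_length = len(corpus)
--         if len(corpus) >= 500:
--             counter_4k += 1
--         elif len(corpus) >= 250:
--             counter_2k += 1
--         elif len(corpus) >= 100: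
--             counter_1k += 1
--         elif len(corpus) >= 30:
--             counter_500 += 1
--
--     return max_length, counter_4k, counter_2k, counter_1k, counter_500
-- ===== SOURCE B (Python) =====
-- def find_longest_length(dataset):
--     """
--     Find the longest Logs and Summary in the entire training set.
--     """
--     lengths = [len(text.split()) for text in dataset]
--     max_length = max(lengths, default=0)
--     counter_4k = sum(1 for L in lengths if L >= 500)
--     counter_2k = sum(1 for L in lengths if 250 <= L < 500)
--     counter_1k = sum(1 for L in lengths if 100 <= L < 250)
--     counter_500 = sum(1 for L in lengths if 30 <= L < 100)
--     return max_length, counter_4k, counter_2k, counter_1k, counter_500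
-- ===== Notes on version B (the rewrite author's own statement) =====
-- stated objective: simpler
-- what changed: Replaces the single fused loop carrying five mutable counters (with an elif chain) by a precomputed length table and five independent reductions: a max with default 0 and four counts over mutually-exclusive half-open ranges.
import Mathlib
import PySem

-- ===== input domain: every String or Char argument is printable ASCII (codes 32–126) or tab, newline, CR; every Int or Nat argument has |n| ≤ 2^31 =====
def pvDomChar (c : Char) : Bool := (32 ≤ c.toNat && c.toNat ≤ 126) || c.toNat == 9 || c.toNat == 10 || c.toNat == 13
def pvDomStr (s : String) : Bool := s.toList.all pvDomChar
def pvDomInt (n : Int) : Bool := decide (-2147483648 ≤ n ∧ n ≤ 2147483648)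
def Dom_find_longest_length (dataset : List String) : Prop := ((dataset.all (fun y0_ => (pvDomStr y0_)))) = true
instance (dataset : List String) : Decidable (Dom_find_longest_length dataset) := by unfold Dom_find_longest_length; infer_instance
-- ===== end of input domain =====

-- B replaces A's fused five-counter loop by a length table plus five independent reductions (objective: simpler).

-- ===== PORT A =====
def pvStepA (st : Int × Int × Int × Int × Int) (text : String) : Int × Int × Int × Int × Int :=
  let n : Int := (PySem.Str.split₀ text).length
  let m := if n > st.1 then n else st.1
  if n ≥ 500 then (m, st.2.1 + 1, st.2.2.1, st.2.2.2.1, st.2.2.2.2)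
  else if n ≥ 250 then (m, st.2.1, st.2.2.1 + 1, st.2.2.2.1, st.2.2.2.2)
  else if n ≥ 100 then (m, st.2.1, st.2.2.1, st.2.2.2.1 + 1, st.2.2.2.2)
  else if n ≥ 30 then (m, st.2.1, st.2.2.1, st.2.2.2.1, st.2.2.2.2 + 1)
  else (m, st.2.1, st.2.2.1, st.2.2.2.1, st.2.2.2.2)

def find_longest_length (dataset : List String) : Int × Int × Int × Int × Int :=
  dataset.foldl pvStepA (0, 0, 0, 0, 0)

-- ===== PORT B =====
def find_longest_length_alt (dataset : List String) : Int × Int × Int × Int × Int :=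
  let lengths : List Int := dataset.map (fun t => ((PySem.Str.split₀ t).length : Int))
  let max_length : Int := (PySem.List.max? lengths (fun y => y)).getD 0
  let counter_4k : Int := lengths.countP (fun L => decide (500 ≤ L))
  let counter_2k : Int := lengths.countP (fun L => decide (250 ≤ L ∧ L < 500))
  let counter_1k : Int := lengths.countP (fun L => decide (100 ≤ L ∧ L < 250))
  let counter_500 : Int := lengths.countP (fun L => decide (30 ≤ L ∧ L < 100))
  (max_length, counter_4k, counter_2k, counter_1k, counter_500)

-- ===== PRECONDITION & SPEC =====
def Spec_find_longest_length (dataset : List String) (out : Int × Int × Int × Int × Int) : Prop := out = find_longest_length_alt dataset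
instance (dataset : List String) (out : Int × Int × Int × Int × Int) : Decidable (Spec_find_longest_length dataset out) := by unfold Spec_find_longest_length; infer_instance

-- ===== CLAIM (what is proved, stated in full; the proofs are below) =====
def Claim_equal_find_longest_length : Prop := ∀ (dataset : List String), Dom_find_longest_length dataset → Spec_find_longest_length dataset (find_longest_length dataset)

-- ===== LEMMAS AND PROOFS =====

def pvLen (t : String) : Int := ((PySem.Str.split₀ t).length : Int)

theorem pv_step1 (st : Int × Int × Int × Int × Int) (x : String) :
    (pvStepA st x).1 = max st.1 (pvLen x) := by
  simp only [pvStepA, pvLen]; split_ifs <;> simp [max_def] <;> omega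

theorem pv_step2 (st : Int × Int × Int × Int × Int) (x : String) :
    (pvStepA st x).2.1 = st.2.1 + if 500 ≤ pvLen x then 1 else 0 := by
  simp only [pvStepA, pvLen]; split_ifs <;> simp

theorem pv_step3 (st : Int × Int × Int × Int × Int) (x : String) :
    (pvStepA st x).2.2.1 = st.2.2.1 + if 250 ≤ pvLen x ∧ pvLen x < 500 then 1 else 0 := by
  simp only [pvStepA, pvLen]; split_ifs <;> simp <;> omega

theorem pv_step4 (st : Int × Int × Int × Int × Int) (x : String) :
    (pvStepA st x).2.2.2.1 = st.2.2.2.1 + if 100 ≤ pvLen x ∧ pvLen x < 250 then 1 else 0 := by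
  simp only [pvStepA, pvLen]; split_ifs <;> simp <;> omega

theorem pv_step5 (st : Int × Int × Int × Int × Int) (x : String) :
    (pvStepA st x).2.2.2.2 = st.2.2.2.2 + if 30 ≤ pvLen x ∧ pvLen x < 100 then 1 else 0 := by
  simp only [pvStepA, pvLen]; split_ifs <;> simp <;> omega

theorem pv_fold1 (xs : List String) (st : Int × Int × Int × Int × Int) :
    (xs.foldl pvStepA st).1 = (xs.map pvLen).foldl max st.1 := by
  induction xs generalizing st with
  | nil => rfl
  | cons x t ih => rw [List.foldl_cons, ih, pv_step1, List.map_cons, List.foldl_cons]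

theorem pv_fold2 (xs : List String) (st : Int × Int × Int × Int × Int) :
    (xs.foldl pvStepA st).2.1
      = st.2.1 + ((xs.map pvLen).countP (fun L => decide (500 ≤ L)) : Int) := by
  induction xs generalizing st with
  | nil => simp
  | cons x t ih =>
    rw [List.foldl_cons, ih, pv_step2, List.map_cons, List.countP_cons]
    simp only [decide_eq_true_eq]
    split_ifs <;> push_cast <;> omega

theorem pv_fold3 (xs : List String) (st : Int × Int × Int × Int × Int) :
    (xs.foldl pvStepA st).2.2.1
      = st.2.2.1 + ((xs.map pvLen).countP (fun L => decide (250 ≤ L ∧ L < 500)) : Int) := by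
  induction xs generalizing st with
  | nil => simp
  | cons x t ih =>
    rw [List.foldl_cons, ih, pv_step3, List.map_cons, List.countP_cons]
    simp only [decide_eq_true_eq]
    split_ifs <;> push_cast <;> omega

theorem pv_fold4 (xs : List String) (st : Int × Int × Int × Int × Int) :
    (xs.foldl pvStepA st).2.2.2.1
      = st.2.2.2.1 + ((xs.map pvLen).countP (fun L => decide (100 ≤ L ∧ L < 250)) : Int) := by
  induction xs generalizing st with
  | nil => simp
  | cons x t ih =>
    rw [List.foldl_cons, ih, pv_step4, List.map_cons, List.countP_cons]
    simp only [decide_eq_true_eq]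
    split_ifs <;> push_cast <;> omega

theorem pv_fold5 (xs : List String) (st : Int × Int × Int × Int × Int) :
    (xs.foldl pvStepA st).2.2.2.2
      = st.2.2.2.2 + ((xs.map pvLen).countP (fun L => decide (30 ≤ L ∧ L < 100)) : Int) := by
  induction xs generalizing st with
  | nil => simp
  | cons x t ih =>
    rw [List.foldl_cons, ih, pv_step5, List.map_cons, List.countP_cons]
    simp only [decide_eq_true_eq]
    split_ifs <;> push_cast <;> omega

theorem find_longest_length_eq_alt (dataset : List String) :
    find_longest_length dataset = find_longest_length_alt dataset := by
  unfold find_longest_length find_longest_length_alt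
  dsimp only
  have hmax : (dataset.foldl pvStepA (0, 0, 0, 0, 0)).1
      = (PySem.List.max? (dataset.map pvLen) (fun y => y)).getD 0 := by
    rw [pv_fold1]
    cases h : dataset.map pvLen with
    | nil => simp [PySem.List.max?]
    | cons l ls =>
      have hl : 0 ≤ l := by
        have hm : l ∈ dataset.map pvLen := by rw [h]; exact List.mem_cons_self
        obtain ⟨t, _, ht⟩ := List.mem_map.mp hm
        simp only [pvLen] at ht; omega
      rw [PySem.List.max?_id_cons, Option.getD_some, List.foldl_cons]
      have : max 0 l = l := by omega
      rw [this]
  refine Prod.ext ?_ (Prod.ext ?_ (Prod.ext ?_ (Prod.ext ?_ ?_)))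
  · simpa [pvLen] using hmax
  · simpa [pvLen] using pv_fold2 dataset (0, 0, 0, 0, 0)
  · simpa [pvLen] using pv_fold3 dataset (0, 0, 0, 0, 0)
  · simpa [pvLen] using pv_fold4 dataset (0, 0, 0, 0, 0)
  · simpa [pvLen] using pv_fold5 dataset (0, 0, 0, 0, 0)

-- ===== VERDICT (by name: the statement is the Claim_ definition above) =====
theorem find_longest_length_spec : Claim_equal_find_longest_length := by
  intro dataset _
  exact find_longest_length_eq_alt dataset
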